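-- pv_equiv track=rewrite | github.com/psymen145/SHA-1-Python | SHA-1.py | sha1
-- ===== SOURCE A (Python) =====
-- def sha1(text:str):
--     """Converts text string to SHA-1 hashed
--
--     Args:
--         text: a string that will hashed by the SHA-1 algo
--
--     Returns:
--         A string representing the hashed version of text
--
--     """
--
--     txt_list = list(text)
--     ascii_list = [ord(w) for w in txt_list]
--     bin_list = [format(w, '08b') for w in ascii_list]
--     joined = ''.join(bin_list) + '1'
--
--     while(len(joined) % 512 != 448):
--         joined += '0'
--
--     suffix = format(len(joined), '08b')
--
--     while(len(suffix) % 64 != 0):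
--         suffix = '0' + suffix
--
--     joined += suffix
--
--     # break into 512 bit chunks
--     chunks = [joined[512*i:512*(i+1)] for i in range(0, int(len(joined)/512))]
--
--     # break each chunk to 32 bit subarrays
--     new_chunks = []
--     for c in chunks:
--         new_chunks.append([c[32*i:32*(i+1)] for i in range(0, 16)])
--
--     return(new_chunks)
-- ===== SOURCE B (Python) =====
-- def sha1(text: str):
--     bits = ''.join(format(ord(c), '08b') for c in text) + '1'
--     bits += '0' * ((448 - len(bits)) % 512)
--     suffix = format(len(bits), '08b')
--     bits += suffix.rjust(((len(suffix) + 63) // 64) * 64, '0')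
--     return [[bits[512*i + 32*j: 512*i + 32*(j+1)] for j in range(16)]
--             for i in range(len(bits) // 512)]
-- ===== Notes on version B (the rewrite author's own statement) =====
-- stated objective: idiomatic
-- what changed: The two incremental padding while-loops (append one zero at a time until len%512==448; prepend one zero at a time until the length suffix is a multiple of 64) are replaced by closed-form padding counts ((448-len)%512 and rjust to ((len+63)//64)*64), and the two chunking passes are fused into one nested comprehension slicing directly at offset 512*i+32*j.
import Mathlib
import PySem

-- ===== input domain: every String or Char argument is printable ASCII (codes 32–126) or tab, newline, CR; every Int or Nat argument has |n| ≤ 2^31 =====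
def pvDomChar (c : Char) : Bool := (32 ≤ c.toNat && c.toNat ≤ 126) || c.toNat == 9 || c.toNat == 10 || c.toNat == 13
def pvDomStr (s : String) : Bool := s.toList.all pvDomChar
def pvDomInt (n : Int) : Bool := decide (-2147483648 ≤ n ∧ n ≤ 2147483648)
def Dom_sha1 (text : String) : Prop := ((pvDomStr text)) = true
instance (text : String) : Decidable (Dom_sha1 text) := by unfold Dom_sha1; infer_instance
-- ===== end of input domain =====

-- B replaces A's two incremental padding while-loops by closed-form padding counts and fuses
-- the two chunking passes into one nested comprehension (objective: idiomatic).

-- ===== PORT A =====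

-- binary digits of n, most significant first ([] for 0); helper for Python format(n, 'b').
-- Structural recursion on a fuel that is always sufficient (n/2 < n), so the kernel can evaluate it.
def binDigitsF : Nat → Nat → List Char
  | 0, _ => []
  | _ + 1, 0 => []
  | fuel + 1, n + 1 => binDigitsF fuel ((n + 1) / 2) ++ [if (n + 1) % 2 = 1 then '1' else '0']

def binDigits (n : Nat) : List Char := binDigitsF n n

-- format(n, '08b'): binary representation left-padded with '0' to at least 8 chars (n ≥ 0 always here)
def fmt08b (n : Nat) : List Char :=
  let s := if n = 0 then ['0'] else binDigits n
  List.replicate (8 - s.length) '0' ++ s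

-- A's first while loop: while len(joined) % 512 != 448: joined += '0'.
-- Fuel 512 is always enough (at most 511 iterations reach 448 mod 512); structural, kernel-evaluable.
def padLoopF : Nat → List Char → List Char
  | 0, j => j
  | fuel + 1, j => if j.length % 512 ≠ 448 then padLoopF fuel (j ++ ['0']) else j

def padLoop (j : List Char) : List Char := padLoopF 512 j

-- A's second while loop: while len(suffix) % 64 != 0: suffix = '0' + suffix.
-- Fuel 64 is always enough (at most 63 iterations reach 0 mod 64); structural, kernel-evaluable.
def prependLoopF : Nat → List Char → List Char
  | 0, s => s
  | fuel + 1, s => if s.length % 64 ≠ 0 then prependLoopF fuel ('0' :: s) else s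

def prependLoop (s : List Char) : List Char := prependLoopF 64 s

-- int(len(joined)/512) is ported as Nat division (exact: float truncation agrees on every
-- length reachable from a real input, far below 2^53)
def sha1 (text : String) : List (List String) :=
  let txtList := text.toList
  let asciiList := txtList.map (fun w => w.toNat)
  let binList := asciiList.map (fun w => fmt08b w)
  let joined := binList.flatten ++ ['1']
  let joined2 := padLoop joined
  let suffix := prependLoop (fmt08b joined2.length)
  let joined3 := joined2 ++ suffix
  let chunks := (PySem.List.pyRange 0 ((joined3.length / 512 : Nat) : Int) 1).map
    (fun i => PySem.List.slice joined3 (some (512 * i)) (some (512 * (i + 1))))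
  chunks.map (fun c => (PySem.List.pyRange 0 16 1).map
    (fun j => String.ofList (PySem.List.slice c (some (32 * j)) (some (32 * (j + 1))))))

-- ===== PORT B =====
def sha1_alt (text : String) : List (List String) :=
  let bits0 := (text.toList.map (fun c => fmt08b c.toNat)).flatten ++ ['1']
  let bits1 := bits0 ++ List.replicate ((PySem.Int.mod (448 - (bits0.length : Int)) 512).toNat) '0'
  let suffix := fmt08b bits1.length
  let bits := bits1 ++ (List.replicate ((suffix.length + 63) / 64 * 64 - suffix.length) '0' ++ suffix)
  (PySem.List.pyRange 0 ((bits.length / 512 : Nat) : Int) 1).map (fun i =>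
    (PySem.List.pyRange 0 16 1).map (fun j =>
      String.ofList (PySem.List.slice bits (some (512 * i + 32 * j)) (some (512 * i + 32 * (j + 1))))))

-- ===== PRECONDITION & SPEC =====
def Spec_sha1 (text : String) (out : List (List String)) : Prop := out = sha1_alt text
instance (text : String) (out : List (List String)) : Decidable (Spec_sha1 text out) := by unfold Spec_sha1; infer_instance

-- ===== CLAIM (what is proved, stated in full; the proofs are below) =====
def Claim_equal_sha1 : Prop := ∀ (text : String), Dom_sha1 text → Spec_sha1 text (sha1 text)

-- ===== LEMMAS AND PROOFS =====

lemma padLoopF_eq (fuel : Nat) (j : List Char) (h : (960 - j.length % 512) % 512 ≤ fuel) :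
    padLoopF fuel j = j ++ List.replicate ((960 - j.length % 512) % 512) '0' := by
  induction fuel generalizing j with
  | zero =>
      have : (960 - j.length % 512) % 512 = 0 := by omega
      simp [padLoopF, this]
  | succ fuel ih =>
      rw [padLoopF]
      by_cases hc : j.length % 512 = 448
      · simp [hc]
      · rw [if_pos hc]
        rw [ih (j ++ ['0']) (by simp only [List.length_append, List.length_cons, List.length_nil]; omega)]
        have hl : (j ++ ['0']).length = j.length + 1 := by simp
        rw [hl]
        have : (960 - j.length % 512) % 512 = (960 - (j.length + 1) % 512) % 512 + 1 := by omega
        rw [this, List.replicate_succ, List.append_assoc]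
        rfl

lemma padLoop_eq (j : List Char) :
    padLoop j = j ++ List.replicate ((960 - j.length % 512) % 512) '0' :=
  padLoopF_eq 512 j (by omega)

lemma prependLoopF_eq (fuel : Nat) (s : List Char) (h : (64 - s.length % 64) % 64 ≤ fuel) :
    prependLoopF fuel s = List.replicate ((64 - s.length % 64) % 64) '0' ++ s := by
  induction fuel generalizing s with
  | zero =>
      have : (64 - s.length % 64) % 64 = 0 := by omega
      simp [prependLoopF, this]
  | succ fuel ih =>
      rw [prependLoopF]
      by_cases hc : s.length % 64 = 0
      · simp [hc]
      · rw [if_pos hc, ih ('0' :: s) (by simp only [List.length_cons]; omega)]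
        have hl : ('0' :: s).length = s.length + 1 := by simp
        rw [hl]
        have : (64 - s.length % 64) % 64 = (64 - (s.length + 1) % 64) % 64 + 1 := by omega
        rw [this, List.replicate_succ']
        simp only [List.append_assoc, List.singleton_append]

lemma prependLoop_eq (s : List Char) :
    prependLoop s = List.replicate ((64 - s.length % 64) % 64) '0' ++ s :=
  prependLoopF_eq 64 s (by omega)

lemma intpad_eq (L : Nat) :
    (PySem.Int.mod (448 - (L : Int)) 512).toNat = (960 - L % 512) % 512 := by
  rw [PySem.Int.mod_eq_emod_of_pos (show (0:Int) < 512 by omega)]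
  omega

lemma rjust_eq (s : Nat) :
    (s + 63) / 64 * 64 - s = (64 - s % 64) % 64 := by omega

lemma chunk_slice (bits : List Char) (a b : Nat) (hb : b < 16) :
    PySem.List.slice
      (PySem.List.slice bits (some ((512 * a : Nat) : Int)) (some ((512 * a + 512 : Nat) : Int)))
      (some ((32 * b : Nat) : Int)) (some ((32 * b + 32 : Nat) : Int))
    = PySem.List.slice bits (some ((512 * a + 32 * b : Nat) : Int))
        (some ((512 * a + 32 * b + 32 : Nat) : Int)) := by
  rw [PySem.List.slice_natCast, PySem.List.slice_natCast, PySem.List.slice_natCast]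
  rw [List.drop_take, List.drop_drop, List.take_take]
  congr 1
  omega

lemma padLoop_eq' (j : List Char) :
    padLoop j = j ++ List.replicate ((PySem.Int.mod (448 - (j.length : Int)) 512).toNat) '0' := by
  rw [padLoop_eq, intpad_eq]

lemma prependLoop_eq' (s : List Char) :
    prependLoop s = List.replicate ((s.length + 63) / 64 * 64 - s.length) '0' ++ s := by
  rw [prependLoop_eq, rjust_eq]

-- ===== VERDICT (by name: the statement is the Claim_ definition above) =====
theorem sha1_spec : Claim_equal_sha1 := by
  intro text _
  unfold Spec_sha1 sha1 sha1_alt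
  simp only [List.map_map, Function.comp_def]
  rw [padLoop_eq', prependLoop_eq']
  set P : List Char := (text.toList.map (fun c => fmt08b c.toNat)).flatten ++ ['1'] with hP
  set bits1 : List Char := P ++ List.replicate ((PySem.Int.mod (448 - (P.length : Int)) 512).toNat) '0' with hb1
  set suf : List Char := fmt08b bits1.length with hsuf
  set bits : List Char := bits1 ++ (List.replicate ((suf.length + 63) / 64 * 64 - suf.length) '0' ++ suf) with hbits
  refine List.map_congr_left ?_
  intro i hi
  rw [PySem.List.mem_pyRange_one] at hi
  obtain ⟨hi0, hiN⟩ := hi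
  obtain ⟨a, rfl⟩ : ∃ a : Nat, i = (a : Int) := ⟨i.toNat, (Int.toNat_of_nonneg hi0).symm⟩
  refine List.map_congr_left ?_
  intro j hj
  rw [PySem.List.mem_pyRange_one] at hj
  obtain ⟨hj0, hj16⟩ := hj
  obtain ⟨b, rfl⟩ : ∃ b : Nat, j = (b : Int) := ⟨j.toNat, (Int.toNat_of_nonneg hj0).symm⟩
  have hb : b < 16 := by exact_mod_cast hj16
  have e1 : (512 * (a : Int)) = ((512 * a : Nat) : Int) := by push_cast; ring
  have e2 : (512 * ((a : Int) + 1)) = ((512 * a + 512 : Nat) : Int) := by push_cast; ring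
  have e3 : (32 * (b : Int)) = ((32 * b : Nat) : Int) := by push_cast; ring
  have e4 : (32 * ((b : Int) + 1)) = ((32 * b + 32 : Nat) : Int) := by push_cast; ring
  rw [e1, e2, e3, e4, ← Nat.cast_add, ← Nat.cast_add,
    show 512 * a + (32 * b + 32) = 512 * a + 32 * b + 32 from by omega, chunk_slice bits a b hb]
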